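-- pv_equiv track=rewrite | github.com/wufniks/docs | pipeline/tools/lexer.py | _indent_width
-- ===== SOURCE A (Python) =====
-- TAB_SIZE = 4  # change this if you want tabs to expand differently
--
-- def _indent_width(line: str) -> int:
--     """Return indent width in spaces, expanding tabs with `TAB_SIZE`."""
--     width = 0
--     for ch in line:
--         if ch == " ":
--             width += 1
--         elif ch == "\t":
--             # advance to next tab stop
--             width += TAB_SIZE - (width % TAB_SIZE)
--         else:
--             break
--     return width
-- ===== SOURCE B (Python) =====
-- TAB_SIZE = 4  # change this if you want tabs to expand differently
--
-- def _indent_width(line: str) -> int: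
--     """Return indent width in spaces, expanding tabs with `TAB_SIZE`."""
--     indent = line[:len(line) - len(line.lstrip(" \t"))]
--     return len(indent.expandtabs(TAB_SIZE))
-- ===== Notes on version B (the rewrite author's own statement) =====
-- stated objective: idiomatic
-- what changed: Replaces the explicit character-by-character accumulating loop (with break) by extracting the leading space/tab prefix via lstrip and delegating the tab-stop arithmetic to str.expandtabs.
import Mathlib
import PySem

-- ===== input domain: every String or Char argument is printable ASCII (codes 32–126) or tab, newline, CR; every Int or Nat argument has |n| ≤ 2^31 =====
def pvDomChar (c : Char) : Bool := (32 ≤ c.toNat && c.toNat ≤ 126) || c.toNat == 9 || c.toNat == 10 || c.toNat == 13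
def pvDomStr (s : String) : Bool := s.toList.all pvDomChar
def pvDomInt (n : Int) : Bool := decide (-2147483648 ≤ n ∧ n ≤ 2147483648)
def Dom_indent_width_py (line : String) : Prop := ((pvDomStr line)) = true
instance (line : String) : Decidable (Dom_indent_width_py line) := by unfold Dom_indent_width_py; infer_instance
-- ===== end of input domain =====

-- B replaces A's explicit accumulating loop (with break) by prefix extraction (lstrip) plus str.expandtabs; no speed claim.

-- ===== PORT A =====
-- the for-loop with break, state = width
def pvIndentLoop : List Char → Int → Int
  | [], width => width
  | c :: cs, width =>
    if c = ' ' then pvIndentLoop cs (width + 1)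
    else if c = '\t' then pvIndentLoop cs (width + (4 - PySem.Int.mod width 4))
    else width

def indent_width_py (line : String) : Int :=
  pvIndentLoop line.toList 0

-- ===== PORT B =====
-- line.lstrip(" \t"): drop leading chars that are in " \t" (exact port of str.lstrip with a chars argument)
def pvLstripST (cs : List Char) : List Char :=
  cs.dropWhile (fun c => c == ' ' || c == '\t')

-- len(s.expandtabs(ts)) tracked directly: (column since last line break, total length);
-- exact port of CPython expandtabs (tab pads to the next stop when ts > 0; '\n'/'\r' reset the column)
def pvExpandtabsLen (ts : Nat) : List Char → Nat → Nat → Nat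
  | [], _, total => total
  | c :: cs, col, total =>
    if c = '\t' then
      let pad := if 0 < ts then ts - col % ts else 0
      pvExpandtabsLen ts cs (col + pad) (total + pad)
    else if c = '\n' ∨ c = '\r' then pvExpandtabsLen ts cs 0 (total + 1)
    else pvExpandtabsLen ts cs (col + 1) (total + 1)

def indent_width_py_alt (line : String) : Int :=
  -- indent = line[:len(line) - len(line.lstrip(" \t"))]; return len(indent.expandtabs(TAB_SIZE))
  (pvExpandtabsLen 4
    (line.toList.take (line.toList.length - (pvLstripST line.toList).length)) 0 0 : Int)

-- ===== PRECONDITION & SPEC =====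
def Spec_indent_width_py (line : String) (out : Int) : Prop := out = indent_width_py_alt line
instance (line : String) (out : Int) : Decidable (Spec_indent_width_py line out) := by unfold Spec_indent_width_py; infer_instance

-- ===== CLAIM (what is proved, stated in full; the proofs are below) =====
def Claim_equal_indent_width_py : Prop := ∀ (line : String), Dom_indent_width_py line → Spec_indent_width_py line (indent_width_py line)

-- ===== LEMMAS AND PROOFS =====

lemma pvLstrip_take_eq_takeWhile (cs : List Char) :
    cs.take (cs.length - (pvLstripST cs).length) = cs.takeWhile (fun c => c == ' ' || c == '\t') := by
  have hl : cs.length - (pvLstripST cs).length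
      = (cs.takeWhile (fun c => c == ' ' || c == '\t')).length := by
    unfold pvLstripST
    have h := congrArg List.length
      (List.takeWhile_append_dropWhile (p := fun c => c == ' ' || c == '\t') (l := cs))
    simp only [List.length_append] at h
    omega
  rw [hl]
  exact (List.prefix_iff_eq_take.mp (List.takeWhile_prefix _)).symm

lemma pvIndentLoop_eq_expand (cs : List Char) (w : Nat) :
    pvIndentLoop cs (w : Int)
      = (pvExpandtabsLen 4 (cs.takeWhile (fun c => c == ' ' || c == '\t')) w w : Nat) := by
  induction cs generalizing w with
  | nil => simp [pvIndentLoop, pvExpandtabsLen]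
  | cons c cs ih =>
    by_cases hs : c = ' '
    · subst hs
      have : ((' ' : Char) == ' ' || (' ' : Char) == '\t') = true := by decide
      simp only [pvIndentLoop, List.takeWhile_cons, this]
      rw [show (w : Int) + 1 = ((w + 1 : Nat) : Int) by push_cast; ring, ih (w + 1)]
      simp [pvExpandtabsLen]
    · by_cases ht : c = '\t'
      · subst ht
        have hb : (('\t' : Char) == ' ' || ('\t' : Char) == '\t') = true := by decide
        have hmod : PySem.Int.mod (w : Int) 4 = ((w % 4 : Nat) : Int) := by
          simp [PySem.Int.mod, Int.fmod_eq_emod]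
        have hlt : w % 4 < 4 := Nat.mod_lt _ (by norm_num)
        have hw : (w : Int) + (4 - PySem.Int.mod (w : Int) 4)
            = ((w + (4 - w % 4) : Nat) : Int) := by
          rw [hmod]; push_cast [Nat.le_of_lt hlt]; ring
        simp only [pvIndentLoop, if_neg (by decide : ¬ ('\t' : Char) = ' '),
          List.takeWhile_cons, hb]
        rw [hw, ih]
        simp [pvExpandtabsLen]
      · have hb : ((c == ' ' || c == '\t')) = false := by
          simp [hs, ht]
        simp [pvIndentLoop, hs, ht, hb, pvExpandtabsLen]

-- ===== VERDICT (by name: the statement is the Claim_ definition above) =====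
theorem indent_width_py_spec : Claim_equal_indent_width_py := by
  intro line _
  unfold Spec_indent_width_py indent_width_py indent_width_py_alt
  rw [pvLstrip_take_eq_takeWhile]
  simpa using pvIndentLoop_eq_expand line.toList 0
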